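-- pv_equiv track=rewrite | github.com/aminrd/adventofcode2022 | day08.py | process_line_l2r
-- ===== SOURCE A (Python) =====
-- def process_line_l2r(l: list):
--     n = len(l)
--     result = [False] * n
--     result[0] = True
--     max_sofar = l[0]
--
--     for i in range(1, n):
--         if l[i] > max_sofar:
--             result[i] = True
--         max_sofar = max(max_sofar, l[i])
--
--     return result
-- ===== SOURCE B (Python) =====
-- def process_line_l2r(l: list):
--     # Divide and conquer: solve each half independently, then a right-half
--     # element stays visible only if it also beats the left half's maximum.
--     def rec(seg):
--         # returns (visibility flags of seg taken alone, max(seg))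
--         if len(seg) == 1:
--             return [True], seg[0]
--         mid = len(seg) // 2
--         fl, ml = rec(seg[:mid])
--         fr, mr = rec(seg[mid:])
--         return fl + [b and x > ml for b, x in zip(fr, seg[mid:])], max(ml, mr)
--
--     return rec(l)[0]
-- ===== Notes on version B (the rewrite author's own statement) =====
-- stated objective: alternative
-- what changed: B replaces A's single left-to-right scan with a running maximum by a divide-and-conquer: it recursively computes the visibility flags and maximum of each half independently, then merges by keeping a right-half flag only when its element also exceeds the left half's maximum.
import Mathlib
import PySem

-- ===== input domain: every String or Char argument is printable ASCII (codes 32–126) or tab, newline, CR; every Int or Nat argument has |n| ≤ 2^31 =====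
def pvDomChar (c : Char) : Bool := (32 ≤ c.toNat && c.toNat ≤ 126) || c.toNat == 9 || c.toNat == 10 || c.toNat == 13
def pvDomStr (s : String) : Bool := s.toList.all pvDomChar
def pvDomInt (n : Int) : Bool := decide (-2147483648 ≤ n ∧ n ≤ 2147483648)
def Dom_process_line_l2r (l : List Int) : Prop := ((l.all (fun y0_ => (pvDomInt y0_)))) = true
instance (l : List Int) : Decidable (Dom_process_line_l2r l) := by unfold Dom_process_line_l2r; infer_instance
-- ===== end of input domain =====

-- B is a divide-and-conquer (solve halves, merge with the left half's maximum) instead of A's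
-- left-to-right scan; same result, different algorithm (objective: alternative).

-- ===== PORT A =====
-- for i in range(1, n): recursion on the index i; l[i] is always in range here, ported as getD
def pyLoopA (l : List Int) (i : Nat) (res : List Bool) (m : Int) : List Bool :=
  if i < l.length then
    let x := l.getD i 0
    let res' := if m < x then res.set i true else res
    pyLoopA l (i + 1) res' (max m x)
  else res
termination_by l.length - i

def process_line_l2r (l : List Int) : List Bool :=
  let n := l.length
  let result := (List.replicate n false).set 0 true
  let m := l.headD 0   -- first element; Pre_ excludes the empty list, where Python raises IndexError
  pyLoopA l 1 result m

-- ===== PORT B =====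
-- rec(seg) of Source B; Python's base case is len(seg) == 1, and rec is never reached with an empty
-- seg when l ≠ [] (on l = [] Python B hits a RecursionError, excluded by Pre_), so the Lean
-- guard `≤ 1` only makes the recursion total.
def pvRecB (seg : List Int) : List Bool × Int :=
  if _h : seg.length ≤ 1 then ([true], seg.headD 0)
  else
    let mid := seg.length / 2
    let L := pvRecB (seg.take mid)
    let R := pvRecB (seg.drop mid)
    (L.1 ++ ((R.1.zip (seg.drop mid)).map fun p => p.1 && decide (L.2 < p.2)), max L.2 R.2)
termination_by seg.length
decreasing_by
  · simp only [List.length_take]; omega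
  · simp only [List.length_drop]; omega

def process_line_l2r_alt (l : List Int) : List Bool := (pvRecB l).1

-- ===== PRECONDITION & SPEC =====
-- Pre_ excludes exactly the empty list, on which A raises IndexError reading the first element (and B a RecursionError).
def Pre_process_line_l2r (l : List Int) : Prop := l ≠ []
instance (l : List Int) : Decidable (Pre_process_line_l2r l) := by unfold Pre_process_line_l2r; infer_instance
def pvWitness_process_line_l2r : List Int := ([3, 1, 4, 4, 5])

def Spec_process_line_l2r (l : List Int) (out : List Bool) : Prop := out = process_line_l2r_alt l
instance (l : List Int) (out : List Bool) : Decidable (Spec_process_line_l2r l out) := by unfold Spec_process_line_l2r; infer_instance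

-- ===== CLAIM (what is proved, stated in full; the proofs are below) =====
def Claim_equal_process_line_l2r : Prop := ∀ (l : List Int), Dom_process_line_l2r l → Pre_process_line_l2r l → Spec_process_line_l2r l (process_line_l2r l)

-- ===== LEMMAS AND PROOFS =====

-- canonical "visible" spec: element visible iff strictly greater than running max m
def vis (m : Int) : List Int → List Bool
  | [] => []
  | x :: xs => decide (m < x) :: vis (max m x) xs

theorem vis_append (p r : List Int) (m : Int) :
    vis m (p ++ r) = vis m p ++ vis (p.foldl max m) r := by
  induction p generalizing m with
  | nil => simp [vis]
  | cons x t ih => simp [vis, ih]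

theorem foldl_max_out (q : List Int) (m b : Int) :
    max m (q.foldl max b) = q.foldl max (max m b) := by
  induction q generalizing b with
  | nil => simp
  | cons x t ih => simpa [max_assoc] using ih (max b x)

theorem zip_vis_mask (t : List Int) (m M : Int) :
    ((vis m t).zip t).map (fun p => p.1 && decide (M < p.2)) = vis (max M m) t := by
  induction t generalizing m with
  | nil => simp [vis]
  | cons x r ih =>
      simp only [vis, List.zip_cons_cons, List.map_cons, ih (max m x)]
      have h1 : (decide (m < x) && decide (M < x)) = decide (max M m < x) := by
        simp [Bool.and_comm]
      have h2 : max M (max m x) = max (max M m) x := (max_assoc M m x).symm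
      rw [h1, h2]

theorem pvRecB_spec : ∀ (n : Nat) (a : Int) (t : List Int), (a :: t).length ≤ n →
    pvRecB (a :: t) = (true :: vis a t, t.foldl max a) := by
  intro n
  induction n with
  | zero => intro a t h; simp at h
  | succ n ih =>
      intro a t h
      by_cases h1 : (a :: t).length ≤ 1
      · have : t = [] := by cases t with
          | nil => rfl
          | cons _ _ => simp at h1
        subst this
        rw [pvRecB]
        simp [vis]
      · rw [pvRecB]
        simp only [dif_neg h1]
        have h' : t.length + 1 ≤ n + 1 := by simpa using h
        have hlen : 2 ≤ t.length + 1 := by simp only [List.length_cons] at h1; omega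
        set mid := (a :: t).length / 2 with hmid
        have hmide : mid = (t.length + 1) / 2 := by rw [hmid]; simp
        have hmid1 : 1 ≤ mid := by rw [hmide]; omega
        have hmidlt : mid < t.length + 1 := by rw [hmide]; omega
        obtain ⟨k, hk⟩ : ∃ k, mid = k + 1 := ⟨mid - 1, by omega⟩
        have htake : (a :: t).take mid = a :: t.take (mid - 1) := by
          rw [hk]; simp
        have hdrop : (a :: t).drop mid = t.drop (mid - 1) := by
          rw [hk]; simp
        have hdne : t.drop (mid - 1) ≠ [] := by
          intro he
          have := List.drop_eq_nil_iff.mp he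
          omega
        obtain ⟨b, q, hbq⟩ : ∃ b q, t.drop (mid - 1) = b :: q := by
          cases hd : t.drop (mid - 1) with
          | nil => exact absurd hd hdne
          | cons b q => exact ⟨b, q, rfl⟩
        set p := t.take (mid - 1) with hp
        have hsplit : t = p ++ b :: q := by
          rw [hp, ← hbq, List.take_append_drop]
        have hlp : p.length = mid - 1 := by
          simp only [hp, List.length_take]; omega
        have hLb : (a :: p).length ≤ n := by
          simp only [List.length_cons, hlp]; omega
        have hRb : (b :: q).length ≤ n := by
          have hsl := congrArg List.length hsplit
          simp only [List.length_append, List.length_cons, hlp] at hsl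
          simp only [List.length_cons]
          omega
        rw [htake, hdrop, hbq, ih a p hLb, ih b q hRb]
        simp only [List.zip_cons_cons, List.map_cons, Bool.true_and, Prod.mk.injEq]
        constructor
        · -- flags component
          rw [zip_vis_mask q b (p.foldl max a)]
          conv_rhs => rw [hsplit]
          rw [vis_append]
          simp [vis]
        · -- max component
          conv_rhs => rw [hsplit]
          rw [List.foldl_append]
          simp only [List.foldl_cons]
          exact foldl_max_out q (p.foldl max a) b

theorem B_eq (a : Int) (xs : List Int) :
    process_line_l2r_alt (a :: xs) = true :: vis a xs := by
  unfold process_line_l2r_alt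
  rw [pvRecB_spec (a :: xs).length a xs (le_refl _)]

theorem aLoop_spec (suf : List Int) : ∀ (l : List Int) (pre : List Bool) (m : Int),
    l.drop pre.length = suf →
    pyLoopA l pre.length (pre ++ List.replicate suf.length false) m = pre ++ vis m suf := by
  induction suf with
  | nil =>
      intro l pre m h
      have hle : l.length ≤ pre.length := by
        by_contra hlt
        push Not at hlt
        have := List.drop_eq_nil_iff.mp h
        omega
      rw [pyLoopA]
      simp [vis, Nat.not_lt.mpr hle]
  | cons x rest ih =>
      intro l pre m h
      have hlt : pre.length < l.length := by
        by_contra hge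
        push Not at hge
        rw [List.drop_eq_nil_iff.mpr hge] at h
        simp at h
      have hx : l.getD pre.length 0 = x := by
        have h1 : l[pre.length]? = some x := by rw [← List.head?_drop, h]; rfl
        simp [List.getD, h1]
      have hset : (pre ++ List.replicate (x :: rest).length false).set pre.length true
          = pre ++ true :: List.replicate rest.length false := by
        rw [List.set_append_right _ _ (Nat.le_refl _)]
        simp [List.replicate_succ]
      rw [pyLoopA]
      simp only [hlt, if_pos, hx]
      have key : (if m < x then (pre ++ List.replicate (x :: rest).length false).set pre.length true
            else pre ++ List.replicate (x :: rest).length false)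
          = (pre ++ [decide (m < x)]) ++ List.replicate rest.length false := by
        by_cases hmx : m < x
        · simp [hmx, List.replicate_succ]
        · simp [hmx, List.replicate_succ]
      rw [key]
      have hdrop : l.drop (pre ++ [decide (m < x)]).length = rest := by
        have : l.drop (pre.length + 1) = (l.drop pre.length).tail := by
          rw [← List.drop_drop]
          simp
        simp only [List.length_append, List.length_cons, List.length_nil]
        rw [this, h]
        rfl
      have := ih l (pre ++ [decide (m < x)]) (max m x) hdrop
      simp only [List.length_append, List.length_cons, List.length_nil] at this ⊢
      rw [Nat.add_comm pre.length 1] at this ⊢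
      rw [this]
      simp [vis]

theorem A_eq (a : Int) (xs : List Int) :
    process_line_l2r (a :: xs) = true :: vis a xs := by
  unfold process_line_l2r
  have h0 : (List.replicate (a :: xs).length false).set 0 true
      = [true] ++ List.replicate xs.length false := by
    simp [List.replicate_succ]
  simp only [List.headD_cons, h0]
  have := aLoop_spec xs (a :: xs) [true] a (by simp)
  simpa using this

-- ===== VERDICT (by name: the statement is the Claim_ definition above) =====
theorem process_line_l2r_spec : Claim_equal_process_line_l2r := by
  intro l _ hpre
  cases l with
  | nil => exact absurd rfl hpre
  | cons a xs =>
      unfold Spec_process_line_l2r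
      rw [A_eq, B_eq]
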